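-- pv_equiv track=rewrite | github.com/dan-leif/ashlands-reborn | scripts/generate_trimmed_chest.py | compute_stream_offsets
-- ===== SOURCE A (Python) =====
-- def compute_stream_offsets(strides, vert_count, buf_size=0):
--     sorted_streams = sorted(strides.keys())
--     offsets = {}
--     pos = 0
--     for i, s in enumerate(sorted_streams):
--         if i == len(sorted_streams) - 1 and buf_size > 0:
--             offsets[s] = buf_size - strides[s] * vert_count
--         else:
--             offsets[s] = pos
--             pos += strides[s] * vert_count
--     return offsets
-- ===== SOURCE B (Python) =====
-- def compute_stream_offsets(strides, vert_count, buf_size=0):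
--     if not strides:
--         return {}
--     last = max(strides)
--     return {
--         s: (buf_size - strides[s] * vert_count
--             if buf_size > 0 and s == last
--             else vert_count * sum(v for t, v in strides.items() if t < s))
--         for s in sorted(strides)
--     }
-- ===== Notes on version B (the rewrite author's own statement) =====
-- stated objective: alternative
-- what changed: B removes A's running position accumulator and index-tested loop entirely: each key's offset is computed independently as vert_count times the sum of the stride values of all strictly smaller keys (a per-key filtered sum in a dict comprehension), and the buf_size override is keyed to max(strides) instead of the last loop index.
import Mathlib
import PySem

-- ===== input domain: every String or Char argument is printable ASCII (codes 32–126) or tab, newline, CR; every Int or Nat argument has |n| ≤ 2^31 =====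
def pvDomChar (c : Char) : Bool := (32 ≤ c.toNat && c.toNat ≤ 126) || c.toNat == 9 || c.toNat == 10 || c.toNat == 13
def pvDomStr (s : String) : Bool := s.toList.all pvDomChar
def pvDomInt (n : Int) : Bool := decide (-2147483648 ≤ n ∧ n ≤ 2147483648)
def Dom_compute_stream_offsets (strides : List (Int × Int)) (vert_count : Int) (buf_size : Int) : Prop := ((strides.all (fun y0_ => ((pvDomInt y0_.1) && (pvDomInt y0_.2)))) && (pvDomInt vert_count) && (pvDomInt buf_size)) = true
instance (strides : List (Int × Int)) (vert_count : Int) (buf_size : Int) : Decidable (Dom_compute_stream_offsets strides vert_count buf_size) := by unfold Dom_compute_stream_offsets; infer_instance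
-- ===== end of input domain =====

-- B drops A's running position accumulator and index-tested loop entirely: each key's offset is
-- computed independently as vert_count * (sum of the strides of all strictly smaller keys), and the
-- buf_size override goes to max(strides) rather than to the last loop index (alternative
-- decomposition; B is O(n^2) where A is O(n log n)).

-- ===== PORT A =====
-- A: one loop over enumerate(sorted keys) with a position accumulator, branching inside the loop
-- on "last index and buf_size > 0".
def compute_stream_offsets (strides : List (Int × Int)) (vert_count : Int) (buf_size : Int) : List (Int × Int) :=
  let d := PySem.Dict.ofList strides
  let sorted_streams := PySem.List.sorted d.keys (fun x => x)
  let res := (PySem.List.enumerate sorted_streams).foldl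
    (fun (st : PySem.Dict Int Int × Int) is =>
      if is.1 = (sorted_streams.length : Int) - 1 ∧ 0 < buf_size then
        (st.1.insert is.2 (buf_size - d.getD is.2 0 * vert_count), st.2)
      else
        (st.1.insert is.2 st.2, st.2 + d.getD is.2 0 * vert_count))
    (PySem.Dict.empty, 0)
  res.1.items

-- ===== PORT B =====
-- B: no accumulator — for each sorted key s the offset is vert_count * sum of the stride values of
-- all keys t < s, and the buf_size override targets last = max(strides).  The Python dict
-- comprehension runs over sorted(strides), whose keys are distinct, so it is ported as the map
-- producing the (key, value) items directly in that order.
def compute_stream_offsets_alt (strides : List (Int × Int)) (vert_count : Int) (buf_size : Int) : List (Int × Int) :=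
  let d := PySem.Dict.ofList strides
  if strides = [] then []
  else
    match PySem.List.max? d.keys (fun x => x) with
    | none => []
    | some last =>
      (PySem.List.sorted d.keys (fun x => x)).map (fun s =>
        (s, if 0 < buf_size ∧ s = last then buf_size - d.getD s 0 * vert_count
            else vert_count * ((d.items.filter (fun tv => decide (tv.1 < s))).map (fun tv => tv.2)).sum))

-- ===== PRECONDITION & SPEC =====
def Spec_compute_stream_offsets (strides : List (Int × Int)) (vert_count : Int) (buf_size : Int) (out : List (Int × Int)) : Prop := out = compute_stream_offsets_alt strides vert_count buf_size
instance (strides : List (Int × Int)) (vert_count : Int) (buf_size : Int) (out : List (Int × Int)) : Decidable (Spec_compute_stream_offsets strides vert_count buf_size out) := by unfold Spec_compute_stream_offsets; infer_instance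

-- ===== CLAIM (what is proved, stated in full; the proofs are below) =====
def Claim_equal_compute_stream_offsets : Prop := ∀ (strides : List (Int × Int)) (vert_count : Int) (buf_size : Int), Dom_compute_stream_offsets strides vert_count buf_size → Spec_compute_stream_offsets strides vert_count buf_size (compute_stream_offsets strides vert_count buf_size)

-- ===== LEMMAS AND PROOFS =====

-- exclusive prefix sums of a list of sizes, starting at p (proof-only characterisation of A's pos accumulator)
def pvPre (p : Int) : List Int → List Int
  | [] => []
  | sz :: t => p :: pvPre (p + sz) t

theorem pvPre_length (szs : List Int) : ∀ p, (pvPre p szs).length = szs.length := by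
  induction szs with
  | nil => intro p; rfl
  | cons sz t ih => intro p; simp [pvPre, ih]

theorem pvPre_append (l : List Int) : ∀ (p x : Int), pvPre p (l ++ [x]) = pvPre p l ++ [p + l.sum] := by
  induction l with
  | nil => intro p x; simp [pvPre]
  | cons a t ih => intro p x; simp [pvPre, ih]; ring_nf

-- folding over an enumerate with a function that ignores the index is folding over the list itself
theorem foldl_enumerate_snd {α β : Type} (ks : List α) : ∀ (s : Int) (g : β → α → β) (init : β),
    (PySem.List.enumerate ks s).foldl (fun st is => g st is.2) init = ks.foldl g init := by
  induction ks with
  | nil => intro s g init; simp [PySem.List.enumerate_nil]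
  | cons k t ih => intro s g init; simp [PySem.List.enumerate_cons, ih]

-- A's else-branch loop builds exactly the dict of (key, exclusive prefix offset) pairs
theorem foldl_else_spec (f : Int → Int) (ks : List Int) : ∀ (o : PySem.Dict Int Int) (p : Int),
    (ks.foldl (fun (st : PySem.Dict Int Int × Int) k => (st.1.insert k st.2, st.2 + f k)) (o, p)).1
      = (ks.zip (pvPre p (ks.map f))).foldl (fun (o : PySem.Dict Int Int) q => o.insert q.1 q.2) o := by
  induction ks with
  | nil => intro o p; simp [pvPre]
  | cons k t ih => intro o p; simpa [pvPre, List.foldl_cons] using ih (o.insert k p) (p + f k)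

-- A's loop when buf_size > 0, over a nonempty key list written as l ++ [x]
theorem pv_coreA_buf (d : PySem.Dict Int Int) (vc buf : Int) (hbuf : 0 < buf) (l : List Int) (x : Int) :
    ((PySem.List.enumerate (l ++ [x])).foldl
        (fun (st : PySem.Dict Int Int × Int) is =>
          if is.1 = ((l ++ [x]).length : Int) - 1 ∧ 0 < buf then
            (st.1.insert is.2 (buf - d.getD is.2 0 * vc), st.2)
          else (st.1.insert is.2 st.2, st.2 + d.getD is.2 0 * vc))
        (PySem.Dict.empty, 0)).1
    = (PySem.Dict.ofList ((l ++ [x]).zip (pvPre 0 ((l ++ [x]).map (fun s => d.getD s 0 * vc))))).insert x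
        (buf - d.getD x 0 * vc) := by
  have hlast : ((0 : Int) + l.length = ((l ++ [x]).length : Int) - 1 ∧ 0 < buf) := by
    refine ⟨?_, hbuf⟩
    simp only [List.length_append, List.length_cons, List.length_nil]; push_cast; omega
  rw [PySem.List.enumerate_append, List.foldl_append]
  simp only [PySem.List.enumerate_cons, PySem.List.enumerate_nil, List.foldl_cons, List.foldl_nil]
  rw [if_pos hlast]
  rw [PySem.List.foldl_congr_mem (PySem.List.enumerate l) _
        (fun (st : PySem.Dict Int Int × Int) is => (st.1.insert is.2 st.2, st.2 + d.getD is.2 0 * vc))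
        (PySem.Dict.empty, (0:Int))
        (by
          intro acc p hp
          rw [PySem.List.mem_enumerate_iff] at hp
          obtain ⟨k, hk, rfl⟩ := hp
          have hcond : ¬ ((0 : Int) + k = ((l ++ [x]).length : Int) - 1 ∧ 0 < buf) := by
            simp only [List.length_append, List.length_cons, List.length_nil]
            push_cast
            omega
          simp only [hcond, if_false]),
      foldl_enumerate_snd l 0
        (fun (st : PySem.Dict Int Int × Int) k => (st.1.insert k st.2, st.2 + d.getD k 0 * vc))
        (PySem.Dict.empty, (0:Int))]
  rw [foldl_else_spec]
  rw [show (l ++ [x]).map (fun s => d.getD s 0 * vc) = l.map (fun s => d.getD s 0 * vc) ++ [d.getD x 0 * vc] by simp]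
  rw [pvPre_append]
  have hlen : l.length = (pvPre 0 (l.map (fun s => d.getD s 0 * vc))).length := by
    rw [pvPre_length]; simp
  rw [List.zip_append hlen]
  simp only [List.zip_cons_cons, List.zip_nil_right]
  simp only [PySem.Dict.ofList, PySem.Dict.update, List.foldl_append, List.foldl_cons, List.foldl_nil]
  rw [PySem.Dict.insert_insert_self]

-- A's loop when buf_size <= 0: the plain prefix-offset dict
theorem pv_coreA_nobuf (d : PySem.Dict Int Int) (vc buf : Int) (hbuf : ¬ 0 < buf) (ks : List Int) :
    ((PySem.List.enumerate ks).foldl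
        (fun (st : PySem.Dict Int Int × Int) is =>
          if is.1 = (ks.length : Int) - 1 ∧ 0 < buf then
            (st.1.insert is.2 (buf - d.getD is.2 0 * vc), st.2)
          else (st.1.insert is.2 st.2, st.2 + d.getD is.2 0 * vc))
        (PySem.Dict.empty, 0)).1
    = PySem.Dict.ofList (ks.zip (pvPre 0 (ks.map (fun s => d.getD s 0 * vc)))) := by
  rw [PySem.List.foldl_congr_mem (PySem.List.enumerate ks) _
        (fun (st : PySem.Dict Int Int × Int) is => (st.1.insert is.2 st.2, st.2 + d.getD is.2 0 * vc))
        (PySem.Dict.empty, (0:Int))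
        (by intro acc p hp; simp [hbuf]),
      foldl_enumerate_snd ks 0
        (fun (st : PySem.Dict Int Int × Int) k => (st.1.insert k st.2, st.2 + d.getD k 0 * vc))
        (PySem.Dict.empty, (0:Int)),
      foldl_else_spec]
  simp [PySem.Dict.ofList, PySem.Dict.update]

-- items of Dict.ofList over pairs with distinct keys
theorem pv_items_ofList (l : List (Int × Int)) (h : (l.map Prod.fst).Nodup) :
    (PySem.Dict.ofList l).items = l := by
  have h0 : ∀ a ∈ l, (PySem.Dict.empty : PySem.Dict Int Int).contains a.1 = false := by
    intro a _; simp [PySem.Dict.contains_empty]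
  have := PySem.Dict.items_foldl_insert_fresh l Prod.fst Prod.snd PySem.Dict.empty h0 h
  simp only [PySem.Dict.ofList, PySem.Dict.update]
  simpa using this

-- the per-key closed form of the exclusive prefix sums over a strictly increasing key list
theorem pv_zip_map (f : Int → Int) : ∀ (ks : List Int), ks.Pairwise (· < ·) → ∀ p,
    ks.zip (pvPre p (ks.map f))
      = ks.map (fun s => (s, p + ((ks.filter (fun k => decide (k < s))).map f).sum)) := by
  intro ks
  induction ks with
  | nil => intro _ _; rfl
  | cons k t ih =>
    intro hpw p
    rw [List.pairwise_cons] at hpw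
    obtain ⟨hk, hpt⟩ := hpw
    simp only [List.map_cons, pvPre, List.zip_cons_cons]
    rw [ih hpt (p + f k)]
    have hhd : (k :: t).filter (fun y => decide (y < k)) = [] := by
      rw [List.filter_eq_nil_iff]
      intro a ha
      rcases List.mem_cons.mp ha with rfl | ha'
      · simp
      · simp [not_lt.mpr (le_of_lt (hk a ha'))]
    congr 1
    · simp [hhd]
    · apply List.map_congr_left
      intro s hs
      have hklt : k < s := hk s hs
      have htl : (k :: t).filter (fun y => decide (y < s)) = k :: t.filter (fun y => decide (y < s)) := by
        simp [hklt]
      rw [htl]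
      simp [add_assoc]

-- translating the filtered key sum into B's filtered items sum
theorem pv_sum_items (d : PySem.Dict Int Int) (vc : Int) (ks : List Int)
    (hnd : d.keys.Nodup) (hperm : ks.Perm d.keys) (s : Int) :
    ((ks.filter (fun k => decide (k < s))).map (fun k => d.getD k 0 * vc)).sum
      = vc * ((d.items.filter (fun tv => decide (tv.1 < s))).map (fun tv => tv.2)).sum := by
  rw [List.sum_map_mul_right _ (fun k => d.getD k 0) vc]
  have hpf : (ks.filter (fun k => decide (k < s))).Perm (d.keys.filter (fun k => decide (k < s))) :=
    hperm.filter _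
  rw [((hpf.map (fun k => d.getD k 0)).sum_eq)]
  have hkeys : d.keys = d.items.map Prod.fst := by simp [PySem.Dict.keys]
  rw [hkeys, List.filter_map, List.map_map]
  have hcongr : (d.items.filter ((fun k => decide (k < s)) ∘ Prod.fst)).map
        ((fun k => d.getD k 0) ∘ Prod.fst)
      = (d.items.filter ((fun k => decide (k < s)) ∘ Prod.fst)).map (fun tv => tv.2) := by
    apply List.map_congr_left
    intro tv htv
    have hmem : tv ∈ d.items := List.mem_of_mem_filter htv
    exact PySem.Dict.getD_of_mem_items d (by simpa using hmem) hnd 0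
  rw [hcongr]
  have hfs : ((fun k => decide (k < s)) ∘ Prod.fst : Int × Int → Bool)
      = fun tv => decide (tv.1 < s) := by funext tv; rfl
  rw [hfs, mul_comm]

-- ===== VERDICT (by name: the statement is the Claim_ definition above) =====
theorem compute_stream_offsets_spec : Claim_equal_compute_stream_offsets := by
  intro strides vc buf _
  unfold Spec_compute_stream_offsets compute_stream_offsets compute_stream_offsets_alt
  simp only []
  by_cases hs : strides = []
  · subst hs; rfl
  · rw [if_neg hs]
    have hnd : (PySem.Dict.ofList strides).keys.Nodup := PySem.Dict.nodup_keys_ofList strides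
    set d := PySem.Dict.ofList strides with hd
    set ks := PySem.List.sorted d.keys (fun x => x) with hks
    have hperm : ks.Perm d.keys := PySem.List.sorted_perm _ _ _
    have hndks : ks.Nodup := (hperm.nodup_iff).mpr hnd
    have hle : ks.Pairwise (fun a b => a ≤ b) := PySem.List.sorted_pairwise d.keys (fun x => x)
    have hne : ks.Pairwise (fun a b => a ≠ b) := hndks
    have hlt : ks.Pairwise (· < ·) := (hle.and hne).imp (fun h => lt_of_le_of_ne h.1 h.2)
    cases hm : PySem.List.max? d.keys (fun x => x) with
    | none =>
      have hk0 : d.keys = [] := (PySem.List.max?_eq_none_iff _ _).mp hm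
      have hks0 : ks = [] := by rw [hks, hk0]; rfl
      rw [hks0]
      rfl
    | some m =>
      simp only []
      by_cases hbuf : 0 < buf
      · -- buf_size > 0: the last sorted key (= max key) gets the override
        have hmem : m ∈ d.keys := PySem.List.max?_mem hm
        have hksne : ks ≠ [] := by
          intro h
          have : d.keys = [] := (PySem.List.sorted_eq_nil_iff _ _ _).mp (hks ▸ h)
          rw [this] at hmem; exact absurd hmem (List.not_mem_nil)
        obtain ⟨l, x, hlx⟩ := (List.eq_nil_or_concat ks).resolve_left hksne
        rw [List.concat_eq_append] at hlx
        have hxks : x ∈ ks := by rw [hlx]; simp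
        have hmx : m = x := by
          have h1 : x ≤ m := PySem.List.max?_isMax hm x (hperm.subset hxks)
          have hmks : m ∈ ks := hperm.mem_iff.mpr hmem
          have h2 : m ≤ x := by
            rw [hlx] at hmks hle
            rcases List.mem_append.mp hmks with hml | hmr
            · exact (List.pairwise_append.mp hle).2.2 m hml x (by simp)
            · simp only [List.mem_singleton] at hmr; exact le_of_eq hmr
          exact le_antisymm h2 h1
        rw [hmx]
        have hxnotl : x ∉ l := by
          rw [hlx] at hndks
          exact fun hxl => (List.disjoint_of_nodup_append hndks) hxl (by simp)
        rw [hlx, pv_coreA_buf d vc buf hbuf l x]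
        -- left side: items of the (insert into the prefix dict)
        have hlenP : l.length = (pvPre 0 (l.map (fun s => d.getD s 0 * vc))).length := by
          rw [pvPre_length]; simp
        have hsplit : (l ++ [x]).zip (pvPre 0 ((l ++ [x]).map (fun s => d.getD s 0 * vc)))
            = l.zip (pvPre 0 (l.map (fun s => d.getD s 0 * vc)))
              ++ [(x, 0 + (l.map (fun s => d.getD s 0 * vc)).sum)] := by
          rw [show (l ++ [x]).map (fun s => d.getD s 0 * vc)
                = l.map (fun s => d.getD s 0 * vc) ++ [d.getD x 0 * vc] by simp,
              pvPre_append, List.zip_append hlenP]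
          rfl
        have hfst : (((l ++ [x]).zip (pvPre 0 ((l ++ [x]).map (fun s => d.getD s 0 * vc)))).map
            Prod.fst) = l ++ [x] := by
          apply List.map_fst_zip
          rw [pvPre_length]; simp
        have hitems0 : (PySem.Dict.ofList ((l ++ [x]).zip
            (pvPre 0 ((l ++ [x]).map (fun s => d.getD s 0 * vc))))).items
            = (l ++ [x]).zip (pvPre 0 ((l ++ [x]).map (fun s => d.getD s 0 * vc))) := by
          apply pv_items_ofList
          rw [hfst, ← hlx]; exact hndks
        have hcont : (PySem.Dict.ofList ((l ++ [x]).zip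
            (pvPre 0 ((l ++ [x]).map (fun s => d.getD s 0 * vc))))).contains x = true := by
          rw [PySem.Dict.contains_iff_mem_keys]
          show x ∈ (PySem.Dict.ofList _).items.map Prod.fst
          rw [hitems0, hfst]; simp
        rw [PySem.Dict.items_insert_of_contains _ _ hcont, hitems0, hsplit, List.map_append]
        have hmapl : (l.zip (pvPre 0 (l.map (fun s => d.getD s 0 * vc)))).map
              (fun p => if (p.1 == x) = true then (x, buf - d.getD x 0 * vc) else p)
            = l.zip (pvPre 0 (l.map (fun s => d.getD s 0 * vc))) := by
          have : ∀ p ∈ l.zip (pvPre 0 (l.map (fun s => d.getD s 0 * vc))),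
              (fun p => if (p.1 == x) = true then (x, buf - d.getD x 0 * vc) else p) p = id p := by
            intro p hp
            have hp1 : p.1 ∈ l := (List.of_mem_zip (by simpa using hp)).1
            have : p.1 ≠ x := fun h => hxnotl (h ▸ hp1)
            simp [this]
          rw [List.map_congr_left this, List.map_id]
        rw [hmapl]
        -- identify the prefix zip with the per-key closed form
        have hzm := pv_zip_map (fun s => d.getD s 0 * vc) (l ++ [x]) (hlx ▸ hlt) 0
        rw [hsplit, List.map_append] at hzm
        have hpre := (List.append_inj' hzm (by simp)).1
        rw [hpre]
        -- now compare with B's map, split over the append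
        rw [List.map_append]
        congr 1
        · apply List.map_congr_left
          intro s hsl
          have hsx : s ≠ x := fun h => hxnotl (h ▸ hsl)
          rw [if_neg (by exact fun h => hsx h.2)]
          rw [zero_add, pv_sum_items d vc (l ++ [x]) hnd (hlx ▸ hperm) s]
        · simp [hbuf]
      · -- buf_size ≤ 0: plain prefix table on both sides
        rw [pv_coreA_nobuf d vc buf hbuf ks]
        have hfst : ((ks.zip (pvPre 0 (ks.map (fun s => d.getD s 0 * vc)))).map Prod.fst) = ks := by
          apply List.map_fst_zip
          rw [pvPre_length]; simp
        rw [pv_items_ofList _ (by rw [hfst]; exact hndks)]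
        rw [pv_zip_map (fun s => d.getD s 0 * vc) ks hlt 0]
        apply List.map_congr_left
        intro s _
        rw [if_neg (fun h => hbuf h.1)]
        rw [zero_add, pv_sum_items d vc ks hnd hperm s]
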